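-- pv_equiv track=rewrite | github.com/fmarz96/exactasprograma | clase3/incendio_forestal.py | propagacion
-- ===== SOURCE A (Python) =====
-- def propagacion(bosque):
-- 	for i in range(0, len(bosque) - 1, 1):
-- 		if bosque[i] == -1 and bosque[i+1] == 1:
-- 			bosque[i+1] = -1
-- 	for j in range(len(bosque) - 1, 0, -1):
-- 		if bosque[j] == -1 and bosque[j-1] == 1:
-- 			bosque[j-1] = -1
-- 	return bosque
-- ===== SOURCE B (Python) =====
-- def propagacion(bosque):
--     n = len(bosque)
--     i = 0
--     while i < n:
--         if bosque[i] in (1, -1):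
--             j = i
--             quemado = False
--             while j < n and bosque[j] in (1, -1):
--                 if bosque[j] == -1:
--                     quemado = True
--                 j += 1
--             if quemado:
--                 for k in range(i, j):
--                     bosque[k] = -1
--             i = j
--         else:
--             i += 1
--     return bosque
-- ===== Notes on version B (the rewrite author's own statement) =====
-- stated objective: alternative
-- what changed: Replaces A's two index sweeps (left-to-right then right-to-left cascading of -1 through adjacent 1s) by a single scan that finds each maximal run of cells in {1,-1} and fills the whole run with -1 iff it contains a -1.
import Mathlib
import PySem

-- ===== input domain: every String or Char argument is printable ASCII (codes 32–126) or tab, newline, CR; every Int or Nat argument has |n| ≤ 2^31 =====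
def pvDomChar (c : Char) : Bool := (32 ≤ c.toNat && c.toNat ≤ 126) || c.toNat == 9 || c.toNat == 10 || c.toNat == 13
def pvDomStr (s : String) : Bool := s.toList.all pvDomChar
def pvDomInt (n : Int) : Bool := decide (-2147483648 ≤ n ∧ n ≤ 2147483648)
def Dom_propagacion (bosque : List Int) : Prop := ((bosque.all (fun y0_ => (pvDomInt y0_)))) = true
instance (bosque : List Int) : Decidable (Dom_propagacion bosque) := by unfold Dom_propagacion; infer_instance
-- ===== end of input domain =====

-- B replaces A's two cascading index sweeps by a single run-scan (fill each maximal {1,-1} run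
-- containing a -1 with -1); both Pythons mutate `bosque` in place and return it — the equivalence
-- proved here is about the returned value.

-- ===== PORT A =====
def pvStep1 (b : List Int) (i : Int) : List Int :=
  if PySem.List.pyGetD b i 0 = -1 ∧ PySem.List.pyGetD b (i + 1) 0 = 1 then
    PySem.List.pySetD b (i + 1) (-1) else b

def pvStep2 (b : List Int) (j : Int) : List Int :=
  if PySem.List.pyGetD b j 0 = -1 ∧ PySem.List.pyGetD b (j - 1) 0 = 1 then
    PySem.List.pySetD b (j - 1) (-1) else b

def propagacion (bosque : List Int) : List Int :=
  -- first loop: for i in range(0, len(bosque)-1, 1)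
  let b1 := (PySem.List.pyRange 0 ((bosque.length : Int) - 1) 1).foldl pvStep1 bosque
  -- second loop: for j in range(len(bosque)-1, 0, -1)
  (PySem.List.pyRange ((bosque.length : Int) - 1) 0 (-1)).foldl pvStep2 b1

-- ===== PORT B =====
-- bosque[i] in (1, -1)
def pvP (x : Int) : Bool := x == 1 || x == -1

def propagacion_alt : List Int → List Int
  | [] => []
  | x :: xs =>
    if pvP x then
      -- scan the maximal run of cells in {1,-1}; fill it with -1 iff it contains a -1
      (if (-1 : Int) ∈ (x :: xs).takeWhile pvP then
          List.replicate ((x :: xs).takeWhile pvP).length (-1)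
        else (x :: xs).takeWhile pvP) ++ propagacion_alt ((x :: xs).dropWhile pvP)
    else x :: propagacion_alt xs
termination_by l => l.length
decreasing_by
  · have h1 : (List.dropWhile pvP xs).length ≤ xs.length := List.length_dropWhile_le pvP xs
    simp_all
  · simp

-- ===== PRECONDITION & SPEC =====
def Spec_propagacion (bosque : List Int) (out : List Int) : Prop := out = propagacion_alt bosque
instance (bosque : List Int) (out : List Int) : Decidable (Spec_propagacion bosque out) := by unfold Spec_propagacion; infer_instance

-- ===== CLAIM (what is proved, stated in full; the proofs are below) =====
def Claim_equal_propagacion : Prop := ∀ (bosque : List Int), Dom_propagacion bosque → Spec_propagacion bosque (propagacion bosque)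

-- ===== LEMMAS AND PROOFS =====

-- Structural model of A's first (left-to-right) sweep: `goL prev t` processes t with `prev` the
-- already-processed value to the left.
def goL : Int → List Int → List Int
  | _, [] => []
  | prev, y :: ys =>
      (if prev = -1 ∧ y = 1 then (-1 : Int) else y) ::
        goL (if prev = -1 ∧ y = 1 then (-1 : Int) else y) ys

def LP : List Int → List Int
  | [] => []
  | x :: xs => x :: goL x xs

-- Structural model of A's second (right-to-left) sweep.
def RP : List Int → List Int
  | [] => []
  | y :: t => (if (RP t).headD 0 = -1 ∧ y = 1 then (-1 : Int) else y) :: RP t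

theorem RP_cons (y : Int) (t : List Int) :
    RP (y :: t) = (if (RP t).headD 0 = -1 ∧ y = 1 then (-1 : Int) else y) :: RP t := rfl

theorem length_goL : ∀ (t : List Int) (prev : Int), (goL prev t).length = t.length := by
  intro t
  induction t with
  | nil => intro prev; rfl
  | cons y ys ih => intro prev; simp [goL, ih]

theorem length_LP (l : List Int) : (LP l).length = l.length := by
  cases l with
  | nil => rfl
  | cons x xs => simp [LP, length_goL]

theorem goL_ne_neg (t : List Int) (prev : Int) (h : prev ≠ -1) : goL prev t = LP t := by
  cases t with
  | nil => rfl
  | cons y ys => simp [goL, LP, h]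

theorem LP_cons_ne (x : Int) (t : List Int) (h : x ≠ -1) : LP (x :: t) = x :: LP t := by
  simp [LP, goL_ne_neg t x h]

theorem RP_cons_ne1 (y : Int) (t : List Int) (h : y ≠ 1) : RP (y :: t) = y :: RP t := by
  rw [RP_cons, if_neg]
  intro hh
  exact h hh.2

theorem goL_break (c : Int) (hc : c ≠ 1) (v : List Int) :
    ∀ (t : List Int) (prev : Int), goL prev (t ++ c :: v) = goL prev t ++ c :: goL c v := by
  intro t
  induction t with
  | nil => intro prev; simp [goL, hc]
  | cons z zs ih => intro prev; simp [goL, ih]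

theorem LP_split (c : Int) (hc1 : c ≠ 1) (hc2 : c ≠ -1) (u v : List Int) :
    LP (u ++ c :: v) = LP u ++ LP (c :: v) := by
  cases u with
  | nil => rfl
  | cons x xs =>
      simp [LP, goL_break c hc1 v xs x, goL_ne_neg v c hc2]

theorem goL_ones : ∀ (t : List Int) (prev : Int), prev ≠ -1 → (∀ y ∈ t, y = 1) → goL prev t = t := by
  intro t
  induction t with
  | nil => intro prev _ _; rfl
  | cons y ys ih =>
      intro prev hp h1
      have hy : y = 1 := h1 y (by simp)
      simp [goL, hp, hy]
      exact ih 1 (by norm_num) (fun z hz => h1 z (by simp [hz]))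

theorem LP_ones (r : List Int) (h : ∀ y ∈ r, y = 1) : LP r = r := by
  cases r with
  | nil => rfl
  | cons x xs =>
      have hx : x = 1 := h x (by simp)
      simp [LP, goL_ones xs x (by simp [hx]) (fun z hz => h z (by simp [hz]))]

theorem goL_mem_pm : ∀ (t : List Int) (prev : Int), (∀ y ∈ t, y = 1 ∨ y = -1) →
    ∀ z ∈ goL prev t, z = 1 ∨ z = -1 := by
  intro t
  induction t with
  | nil => intro prev _ z hz; simp [goL] at hz
  | cons y ys ih =>
      intro prev h z hz
      simp only [goL, List.mem_cons] at hz
      rcases hz with hz | hz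
      · subst hz
        split
        · right; rfl
        · exact h y (by simp)
      · exact ih _ (fun w hw => h w (by simp [hw])) z hz

theorem LP_mem_pm (r : List Int) (h : ∀ y ∈ r, y = 1 ∨ y = -1) :
    ∀ z ∈ LP r, z = 1 ∨ z = -1 := by
  cases r with
  | nil => intro z hz; simp [LP] at hz
  | cons x xs =>
      intro z hz
      simp only [LP, List.mem_cons] at hz
      rcases hz with hz | hz
      · rw [hz]; exact h x (by simp)
      · exact goL_mem_pm xs x (fun w hw => h w (by simp [hw])) z hz

theorem goL_last_neg : ∀ (t : List Int) (prev : Int), (∀ y ∈ t, y = 1 ∨ y = -1) →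
    (prev = -1 ∨ -1 ∈ t) → (goL prev t).getLastD prev = -1 := by
  intro t
  induction t with
  | nil =>
      intro prev _ h
      rcases h with h | h
      · simpa [goL] using h
      · simp at h
  | cons y ys ih =>
      intro prev hpm h
      have hy : y = 1 ∨ y = -1 := hpm y (by simp)
      simp only [goL, List.getLastD_cons]
      by_cases hprev : prev = -1
      · have heq : (if prev = -1 ∧ y = 1 then (-1 : Int) else y) = -1 := by
          rcases hy with hy | hy <;> simp [hprev, hy]
        rw [heq]
        exact ih (-1) (fun w hw => hpm w (by simp [hw])) (Or.inl rfl)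
      · have h' : -1 ∈ y :: ys := by
          rcases h with h | h
          · exact absurd h hprev
          · exact h
        by_cases hyneg : y = -1
        · have heq : (if prev = -1 ∧ y = 1 then (-1 : Int) else y) = -1 := by simp [hyneg]
          rw [heq]
          exact ih (-1) (fun w hw => hpm w (by simp [hw])) (Or.inl rfl)
        · have hy1 : y = 1 := by rcases hy with hy | hy; exact hy; exact absurd hy hyneg
          have hmem : -1 ∈ ys := by
            rcases List.mem_cons.mp h' with h'' | h''
            · exact absurd h''.symm (by simp [hy1])
            · exact h''
          have heq : (if prev = -1 ∧ y = 1 then (-1 : Int) else y) = y := by simp [hprev]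
          rw [heq]
          exact ih y (fun w hw => hpm w (by simp [hw])) (Or.inr hmem)

theorem LP_last_neg (r : List Int) (hpm : ∀ y ∈ r, y = 1 ∨ y = -1) (hmem : -1 ∈ r) :
    (LP r).getLastD 0 = -1 := by
  cases r with
  | nil => simp at hmem
  | cons x xs =>
      simp only [LP, List.getLastD_cons]
      by_cases hx : x = -1
      · exact goL_last_neg xs x (fun w hw => hpm w (by simp [hw])) (Or.inl hx)
      · have h1 : -1 ∈ xs := by
          rcases List.mem_cons.mp hmem with h | h
          · exact absurd h.symm hx
          · exact h
        exact goL_last_neg xs x (fun w hw => hpm w (by simp [hw])) (Or.inr h1)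

theorem RP_burn : ∀ (l : List Int), (∀ z ∈ l, z = 1 ∨ z = -1) → l.getLastD 0 = -1 →
    RP l = List.replicate l.length (-1) := by
  intro l
  induction l with
  | nil => intro _ h; simp at h
  | cons y t ih =>
      intro hpm hlast
      cases t with
      | nil =>
          simp only [List.getLastD_cons, List.getLastD_nil] at hlast
          subst hlast
          rfl
      | cons z ts =>
          have ht : RP (z :: ts) = List.replicate (z :: ts).length (-1) := by
            apply ih (fun w hw => hpm w (by simp [hw]))
            simpa [List.getLastD_cons] using hlast
          have hy : y = 1 ∨ y = -1 := hpm y (by simp)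
          rw [RP_cons, ht]
          have hhead : (List.replicate (z :: ts).length (-1)).headD (0 : Int) = -1 := by
            simp [List.replicate_succ]
          rw [hhead]
          have heq : (if (-1 : Int) = -1 ∧ y = 1 then (-1 : Int) else y) = -1 := by
            rcases hy with hy | hy <;> simp [hy]
          rw [heq]
          simp [List.replicate_succ]

theorem RP_ones : ∀ (r : List Int), (∀ y ∈ r, y = 1) → RP r = r := by
  intro r
  induction r with
  | nil => intro _; rfl
  | cons y t ih =>
      intro h
      have ht : RP t = t := ih (fun w hw => h w (by simp [hw]))
      rw [RP_cons, ht, if_neg]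
      intro hh
      cases t with
      | nil => simp at hh
      | cons z ts =>
          have hz : z = 1 := h z (by simp)
          rw [List.headD_cons] at hh
          omega

theorem RP_split (c : Int) (hc1 : c ≠ 1) (hc2 : c ≠ -1) (v : List Int) :
    ∀ (u : List Int), RP (u ++ c :: v) = RP u ++ c :: RP v := by
  intro u
  induction u with
  | nil => rw [List.nil_append, RP_cons_ne1 c v hc1]; rfl
  | cons y u' ih =>
      rw [List.cons_append, RP_cons, RP_cons, ih, List.cons_append]
      have hcond : ((RP u' ++ c :: RP v).headD (0 : Int) = -1) ↔ ((RP u').headD (0 : Int) = -1) := by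
        cases hu : RP u' with
        | nil => simp [hc2]
        | cons w ws => simp
      by_cases hcase : ((RP u').headD (0 : Int) = -1 ∧ y = 1)
      · rw [if_pos hcase, if_pos ⟨hcond.mpr hcase.1, hcase.2⟩]
      · rw [if_neg hcase, if_neg (fun hh => hcase ⟨hcond.mp hh.1, hh.2⟩)]

-- unfolding lemmas for B's port
theorem alt_nil : propagacion_alt [] = [] := by simp [propagacion_alt]

theorem alt_cons_neg (x : Int) (xs : List Int) (h : pvP x = false) :
    propagacion_alt (x :: xs) = x :: propagacion_alt xs := by
  rw [propagacion_alt]; simp [h]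

theorem alt_cons_pos (x : Int) (xs : List Int) (h : pvP x = true) :
    propagacion_alt (x :: xs) =
      (if (-1 : Int) ∈ (x :: xs).takeWhile pvP then
          List.replicate ((x :: xs).takeWhile pvP).length (-1)
        else (x :: xs).takeWhile pvP) ++ propagacion_alt ((x :: xs).dropWhile pvP) := by
  rw [propagacion_alt]; simp [h]

theorem dropWhile_head_false {p : Int → Bool} : ∀ (l : List Int) (c : Int) (s : List Int),
    l.dropWhile p = c :: s → p c = false := by
  intro l
  induction l with
  | nil => intro c s h; simp [List.dropWhile] at h
  | cons x xs ih =>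
      intro c s h
      by_cases hx : p x
      · rw [List.dropWhile_cons_of_pos hx] at h; exact ih c s h
      · rw [List.dropWhile_cons_of_neg hx] at h
        cases h; simpa using hx

theorem pvP_cases {x : Int} (h : pvP x = true) : x = 1 ∨ x = -1 := by
  simp [pvP] at h; exact h

theorem pvP_false {x : Int} (h : pvP x = false) : x ≠ 1 ∧ x ≠ -1 := by
  simp [pvP] at h; exact h

-- main structural theorem: A's two sweeps = B's run-scan
theorem RP_LP_eq_alt : ∀ (b : List Int), RP (LP b) = propagacion_alt b := by
  have key : ∀ (n : Nat) (b : List Int), b.length ≤ n → RP (LP b) = propagacion_alt b := by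
    intro n
    induction n with
    | zero =>
        intro b hb
        have hbn : b = [] := List.eq_nil_of_length_eq_zero (Nat.le_zero.mp hb)
        subst hbn; simp [LP, RP, alt_nil]
    | succ n ih =>
        intro b hb
        cases b with
        | nil => simp [LP, RP, alt_nil]
        | cons x xs =>
          by_cases hx : pvP x
          · -- head is in {1,-1}: peel the maximal run
            have hsplit : (x :: xs).takeWhile pvP ++ (x :: xs).dropWhile pvP = x :: xs :=
              List.takeWhile_append_dropWhile
            have hrpm : ∀ y ∈ (x :: xs).takeWhile pvP, y = 1 ∨ y = -1 :=
              fun y hy => pvP_cases (List.mem_takeWhile_imp hy)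
            rw [alt_cons_pos x xs hx]
            cases hs : (x :: xs).dropWhile pvP with
            | nil =>
                rw [alt_nil, List.append_nil]
                have hr : (x :: xs).takeWhile pvP = x :: xs := by
                  rw [hs] at hsplit; simpa using hsplit
                rw [hr] at hrpm ⊢
                by_cases hburn : (-1 : Int) ∈ x :: xs
                · rw [if_pos hburn,
                    RP_burn _ (LP_mem_pm _ hrpm) (LP_last_neg _ hrpm hburn), length_LP]
                · have hones : ∀ y ∈ x :: xs, y = 1 := by
                    intro y hy
                    rcases hrpm y hy with h | h
                    · exact h
                    · exact absurd (h ▸ hy) hburn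
                  rw [if_neg hburn, LP_ones _ hones, RP_ones _ hones]
            | cons c s' =>
                have hc : pvP c = false := dropWhile_head_false (x :: xs) c s' hs
                have hc1 : c ≠ 1 := (pvP_false hc).1
                have hc2 : c ≠ -1 := (pvP_false hc).2
                have hb' : x :: xs = (x :: xs).takeWhile pvP ++ c :: s' := by
                  conv_lhs => rw [← hsplit, hs]
                set r := (x :: xs).takeWhile pvP with hrdef
                have hlen' : (c :: s').length ≤ n := by
                  have hlen := congrArg List.length hb'
                  have hrne : 1 ≤ r.length := by
                    rw [hrdef, List.takeWhile_cons_of_pos hx]; simp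
                  simp only [List.length_append, List.length_cons] at hlen hb ⊢
                  omega
                have ihcs : RP (LP (c :: s')) = propagacion_alt (c :: s') := ih (c :: s') hlen'
                have hRPc : c :: RP (LP s') = propagacion_alt (c :: s') := by
                  rw [← ihcs, LP_cons_ne c s' hc2, RP_cons_ne1 c (LP s') hc1]
                rw [show x :: xs = r ++ c :: s' from hb',
                  LP_split c hc1 hc2, LP_cons_ne c s' hc2, RP_split c hc1 hc2]
                by_cases hburn : (-1 : Int) ∈ r
                · rw [if_pos hburn,
                    RP_burn _ (LP_mem_pm _ hrpm) (LP_last_neg _ hrpm hburn), length_LP, hRPc]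
                · have hones : ∀ y ∈ r, y = 1 := by
                    intro y hy
                    rcases hrpm y hy with h | h
                    · exact h
                    · exact absurd (h ▸ hy) hburn
                  rw [if_neg hburn, LP_ones _ hones, RP_ones _ hones, hRPc]
          · -- head not in {1,-1}: both sides keep it
            have hx' : pvP x = false := by simpa using hx
            rw [LP_cons_ne x xs (pvP_false hx').2, RP_cons_ne1 x (LP xs) (pvP_false hx').1,
              alt_cons_neg x xs hx', ih xs (by simp at hb; omega)]
  intro b; exact key b.length b (Nat.le_refl _)

-- ==== bridge: A's index folds equal the structural sweeps ====

theorem set_append_len (u : List Int) (v : List Int) (a : Int) :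
    (u ++ v).set u.length a = u ++ v.set 0 a := by
  induction u with
  | nil => simp
  | cons x xs ih => simp [ih]

theorem goL_append_last : ∀ (t : List Int) (prev y : Int),
    goL prev (t ++ [y]) =
      goL prev t ++ [if (goL prev t).getLastD prev = -1 ∧ y = 1 then -1 else y] := by
  intro t
  induction t with
  | nil => intro prev y; simp [goL]
  | cons z zs ih =>
      intro prev y
      simp only [List.cons_append, goL, ih, List.getLastD_cons]

theorem LP_append_last (u : List Int) (y : Int) :
    LP (u ++ [y]) = LP u ++ [if (LP u).getLastD 0 = -1 ∧ y = 1 then -1 else y] := by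
  cases u with
  | nil => simp [LP, goL]
  | cons x xs =>
      simp only [List.cons_append, LP, goL_append_last, List.getLastD_cons]

theorem getD_append_len (u v : List Int) :
    (u ++ v).getD u.length 0 = v.headD 0 := by
  induction u with
  | nil => cases v <;> rfl
  | cons x xs ih => simpa using ih

theorem getD_append_lt (u v : List Int) : ∀ (i : Nat), i < u.length →
    (u ++ v).getD i 0 = u.getD i 0 := by
  induction u with
  | nil => intro i h; simp at h
  | cons x xs ih =>
      intro i h
      cases i with
      | zero => rfl
      | succ k => simpa using ih k (by simpa using h)

theorem set_append_lt (u v : List Int) (a : Int) : ∀ (i : Nat), i < u.length →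
    (u ++ v).set i a = u.set i a ++ v := by
  induction u with
  | nil => intro i h; simp at h
  | cons x xs ih =>
      intro i h
      cases i with
      | zero => rfl
      | succ k => simpa using ih k (by simpa using h)

theorem getD_take (L : List Int) : ∀ (n i : Nat), i < n → (L.take n).getD i 0 = L.getD i 0 := by
  induction L with
  | nil => intro n i _; simp
  | cons x xs ih =>
      intro n i h
      cases n with
      | zero => omega
      | succ m =>
          cases i with
          | zero => rfl
          | succ k => simpa using ih m k (by omega)

theorem getD_last : ∀ (l : List Int) (i : Nat), i + 1 = l.length → l.getD i 0 = l.getLastD 0 := by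
  intro l
  induction l with
  | nil => intro i h; simp at h
  | cons x xs ih =>
      intro i h
      cases xs with
      | nil =>
          have : i = 0 := by simpa using h
          subst this; rfl
      | cons z zs =>
          have hi : 1 ≤ i := by simp at h; omega
          obtain ⟨k, rfl⟩ := Nat.exists_eq_add_of_le hi
          have h1 : (x :: z :: zs).getD (1 + k) 0 = (z :: zs).getD k 0 := by
            rw [Nat.add_comm]; rfl
          rw [h1, List.getLastD_cons, ih k (by simp at h ⊢; omega)]
          rw [List.getLastD_cons, List.getLastD_cons]

theorem RP_singleton (a : Int) : RP [a] = [a] := by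
  have h0 : RP ([] : List Int) = [] := rfl
  rw [RP_cons, h0, if_neg (by simp)]

theorem inv1 (L : List Int) : ∀ (m i : Nat), i + m + 1 = L.length →
    (PySem.List.pyRange (i : Int) ((L.length : Int) - 1) 1).foldl pvStep1
        (LP (L.take (i + 1)) ++ L.drop (i + 1)) = LP L := by
  intro m
  induction m with
  | zero =>
      intro i hi
      have hlen : ((L.length : Int) - 1) = (i : Int) := by
        have := hi; push_cast [← this]; ring
      rw [hlen, PySem.List.pyRange_one_eq_nil (le_refl _), List.foldl_nil]
      have h1 : L.take (i + 1) = L := List.take_of_length_le (by omega)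
      have h2 : L.drop (i + 1) = [] := List.drop_eq_nil_of_le (by omega)
      rw [h1, h2, List.append_nil]
  | succ m ih =>
      intro i hi
      have hi1 : i + 1 < L.length := by omega
      have hilt : (i : Int) < (L.length : Int) - 1 := by push_cast [← hi]; omega
      rw [PySem.List.pyRange_one_cons hilt, List.foldl_cons]
      have hulen : (LP (L.take (i + 1))).length = i + 1 := by
        rw [length_LP, List.length_take]; omega
      have hget : L[i+1]? = some L[i+1] := List.getElem?_eq_getElem hi1
      have hdrop : L.drop (i + 1) = L[i+1] :: L.drop (i + 2) := by
        rw [List.drop_eq_getElem_cons hi1]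
      have htake : L.take (i + 2) = L.take (i + 1) ++ [L[i+1]] := by
        rw [List.take_add_one, hget]; rfl
      have hstep : pvStep1 (LP (L.take (i + 1)) ++ L.drop (i + 1)) (i : Int)
          = LP (L.take (i + 2)) ++ L.drop (i + 2) := by
        unfold pvStep1
        have hc1 : (i : Int) + 1 = ((i + 1 : Nat) : Int) := by push_cast; ring
        rw [hc1, PySem.List.pyGetD_natCast, PySem.List.pyGetD_natCast, PySem.List.pySetD_natCast]
        have hr1 : (LP (L.take (i + 1)) ++ L.drop (i + 1)).getD i 0
            = (LP (L.take (i + 1))).getLastD 0 := by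
          rw [getD_append_lt _ _ i (by omega), getD_last _ i (by omega)]
        have hr2 : (LP (L.take (i + 1)) ++ L.drop (i + 1)).getD (i + 1) 0 = L[i+1] := by
          have h := getD_append_len (LP (L.take (i + 1))) (L.drop (i + 1))
          rw [hulen] at h
          rw [h, hdrop, List.headD_cons]
        have hw : (LP (L.take (i + 1)) ++ L.drop (i + 1)).set (i + 1) (-1)
            = LP (L.take (i + 1)) ++ (-1) :: L.drop (i + 2) := by
          have h := set_append_len (LP (L.take (i + 1))) (L.drop (i + 1)) (-1)
          rw [hulen] at h
          rw [h, hdrop, List.set_cons_zero]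
        rw [hr1, hr2, htake, LP_append_last]
        by_cases hcond : ((LP (L.take (i + 1))).getLastD 0 = -1 ∧ L[i+1] = 1)
        · rw [if_pos hcond, if_pos hcond, hw]
          simp
        · rw [if_neg hcond, if_neg hcond, hdrop]
          simp
      rw [hstep]
      have hc2 : (i : Int) + 1 = ((i + 1 : Nat) : Int) := by push_cast; ring
      rw [hc2]
      have := ih (i + 1) (by omega)
      simpa using this

theorem fold1 (L : List Int) :
    (PySem.List.pyRange 0 ((L.length : Int) - 1) 1).foldl pvStep1 L = LP L := by
  cases L with
  | nil =>
      rw [PySem.List.pyRange_one_eq_nil (by norm_num), List.foldl_nil]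
      rfl
  | cons x xs =>
      have h0 : ((0 : Nat) : Int) = (0 : Int) := by norm_num
      have := inv1 (x :: xs) xs.length 0 (by simp)
      rw [h0] at this
      simpa [LP] using this

theorem inv2 (L : List Int) : ∀ (j : Nat), j < L.length →
    (PySem.List.pyRange (j : Int) 0 (-1)).foldl pvStep2 (L.take j ++ RP (L.drop j)) = RP L := by
  intro j
  induction j with
  | zero =>
      intro _
      rw [show ((0 : Nat) : Int) = (0 : Int) from by norm_num,
        PySem.List.pyRange_neg_one_eq_nil (by norm_num), List.foldl_nil]
      simp
  | succ j ih =>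
      intro hj
      have hj' : j < L.length := Nat.lt_of_succ_lt hj
      have hpos : (0 : Int) < ((j + 1 : Nat) : Int) := by positivity
      rw [PySem.List.pyRange_neg_one_cons hpos, List.foldl_cons]
      have hulen : (L.take (j + 1)).length = j + 1 := by
        rw [List.length_take]; omega
      have hget : L[j]? = some L[j] := List.getElem?_eq_getElem hj'
      have hgetD : L.getD j 0 = L[j] := by
        simp [List.getD_eq_getElem?_getD, hget]
      have hdrop : L.drop j = L[j] :: L.drop (j + 1) := by
        rw [List.drop_eq_getElem_cons hj']
      have htake : L.take (j + 1) = L.take j ++ [L[j]] := by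
        rw [List.take_add_one, hget]; rfl
      have hstep : pvStep2 (L.take (j + 1) ++ RP (L.drop (j + 1))) ((j + 1 : Nat) : Int)
          = L.take j ++ RP (L.drop j) := by
        unfold pvStep2
        have hc1 : ((j + 1 : Nat) : Int) - 1 = (j : Int) := by push_cast; ring
        rw [hc1, PySem.List.pyGetD_natCast, PySem.List.pyGetD_natCast, PySem.List.pySetD_natCast]
        have hr1 : (L.take (j + 1) ++ RP (L.drop (j + 1))).getD (j + 1) 0
            = (RP (L.drop (j + 1))).headD 0 := by
          have h := getD_append_len (L.take (j + 1)) (RP (L.drop (j + 1)))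
          rw [hulen] at h
          exact h
        have hr2 : (L.take (j + 1) ++ RP (L.drop (j + 1))).getD j 0 = L[j] := by
          rw [getD_append_lt _ _ j (by omega), getD_take _ _ _ (by omega), hgetD]
        have hw : (L.take (j + 1) ++ RP (L.drop (j + 1))).set j (-1)
            = L.take j ++ (-1) :: RP (L.drop (j + 1)) := by
          rw [set_append_lt _ _ _ j (by omega), htake]
          have hjlen : (L.take j).length = j := by rw [List.length_take]; omega
          have h := set_append_len (L.take j) [L[j]] (-1)
          rw [hjlen] at h
          rw [h, List.set_cons_zero, List.append_assoc]
          rfl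
        rw [hr1, hr2, hdrop, RP_cons]
        by_cases hcond : ((RP (L.drop (j + 1))).headD 0 = -1 ∧ L[j] = 1)
        · rw [if_pos hcond, if_pos hcond, hw]
        · rw [if_neg hcond, if_neg hcond, htake, List.append_assoc]
          rfl
      rw [hstep]
      have hc2 : ((j + 1 : Nat) : Int) - 1 = (j : Int) := by push_cast; ring
      rw [hc2]
      exact ih hj'

theorem fold2 (L : List Int) :
    (PySem.List.pyRange ((L.length : Int) - 1) 0 (-1)).foldl pvStep2 L = RP L := by
  cases hL : L with
  | nil =>
      rw [PySem.List.pyRange_neg_one_eq_nil (by norm_num), List.foldl_nil]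
      rfl
  | cons x xs =>
      have hlen : 1 ≤ L.length := by rw [hL]; simp
      have hcast : ((L.length : Int) - 1) = ((L.length - 1 : Nat) : Int) := by
        push_cast [Nat.cast_sub hlen]; ring
      rw [← hL] at *
      have hj : L.length - 1 < L.length := by omega
      obtain ⟨a, ha⟩ : ∃ a, L.drop (L.length - 1) = [a] := by
        have h1 : (L.drop (L.length - 1)).length = 1 := by
          rw [List.length_drop]; omega
        exact List.length_eq_one_iff.mp h1
      have hstate : L.take (L.length - 1) ++ RP (L.drop (L.length - 1)) = L := by
        rw [ha, RP_singleton, ← ha, List.take_append_drop]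
      have hinv := inv2 L (L.length - 1) hj
      rw [hstate] at hinv
      rw [hcast]
      exact hinv

theorem prop_eq_RP_LP (b : List Int) : propagacion b = RP (LP b) := by
  show (PySem.List.pyRange ((b.length : Int) - 1) 0 (-1)).foldl pvStep2
      ((PySem.List.pyRange 0 ((b.length : Int) - 1) 1).foldl pvStep1 b) = RP (LP b)
  rw [fold1 b, ← length_LP b, fold2 (LP b)]

-- ===== VERDICT (by name: the statement is the Claim_ definition above) =====
theorem propagacion_spec : Claim_equal_propagacion := by
  intro bosque _
  unfold Spec_propagacion
  rw [prop_eq_RP_LP, RP_LP_eq_alt]
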